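-- pv_equiv track=rewrite | github.com/egorjke93/network-automatisation | core/constants/platforms.py | get_vendor_by_platform
-- ===== SOURCE A (Python) =====
-- from typing import Dict, List
--
-- VENDOR_MAP: Dict[str, List[str]] = {
--     "cisco": [
--         "cisco_ios",
--         "cisco_iosxe",
--         "cisco_xe",
--         "cisco_iosxr",
--         "cisco_xr",
--         "cisco_nxos",
--         "cisco_asa",
--     ],
--     "arista": ["arista_eos"],
--     "juniper": ["juniper", "juniper_junos"],
--     "huawei": ["huawei", "huawei_vrp"],
--     "eltex": ["eltex", "eltex_mes"],
--     "mikrotik": ["mikrotik_routeros"],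
--     "fortinet": ["fortinet"],
--     "paloalto": ["paloalto_panos"],
--     "qtech": ["qtech", "qtech_qsw"],
-- }
--
-- def get_vendor_by_platform(platform: str) -> str:
--     """
--     Определяет вендора по платформе.
--
--     Args:
--         platform: Платформа устройства (cisco_ios, arista_eos, etc.)
--
--     Returns:
--         str: Название вендора
--     """
--     if not platform:
--         return "unknown"
--
--     platform_lower = platform.lower()
--     for vendor, platforms in VENDOR_MAP.items():
--         if platform_lower in platforms:
--             return vendor
--
--     # Пробуем извлечь из platform
--     return platform.split("_")[0]
-- ===== SOURCE B (Python) =====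
-- from typing import Dict, List
--
-- VENDOR_MAP: Dict[str, List[str]] = {
--     "cisco": [
--         "cisco_ios",
--         "cisco_iosxe",
--         "cisco_xe",
--         "cisco_iosxr",
--         "cisco_xr",
--         "cisco_nxos",
--         "cisco_asa",
--     ],
--     "arista": ["arista_eos"],
--     "juniper": ["juniper", "juniper_junos"],
--     "huawei": ["huawei", "huawei_vrp"],
--     "eltex": ["eltex", "eltex_mes"],
--     "mikrotik": ["mikrotik_routeros"],
--     "fortinet": ["fortinet"],
--     "paloalto": ["paloalto_panos"],
--     "qtech": ["qtech", "qtech_qsw"],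
-- }
--
-- # Inverted index built once at import time: platform -> vendor.
-- REVERSE_VENDOR: Dict[str, str] = {
--     plat: vendor for vendor, plats in VENDOR_MAP.items() for plat in plats
-- }
--
--
-- def get_vendor_by_platform(platform: str) -> str:
--     if not platform:
--         return "unknown"
--     vendor = REVERSE_VENDOR.get(platform.lower())
--     if vendor is not None:
--         return vendor
--     return platform.split("_")[0]
-- ===== Notes on version B (the rewrite author's own statement) =====
-- stated objective: idiomatic
-- what changed: Replaces the per-call scan over VENDOR_MAP's vendor lists with a module-level inverted dict (platform -> vendor) built once, so the function does a single hash lookup instead of iterating vendors and membership-testing each platform list.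
import Mathlib
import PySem

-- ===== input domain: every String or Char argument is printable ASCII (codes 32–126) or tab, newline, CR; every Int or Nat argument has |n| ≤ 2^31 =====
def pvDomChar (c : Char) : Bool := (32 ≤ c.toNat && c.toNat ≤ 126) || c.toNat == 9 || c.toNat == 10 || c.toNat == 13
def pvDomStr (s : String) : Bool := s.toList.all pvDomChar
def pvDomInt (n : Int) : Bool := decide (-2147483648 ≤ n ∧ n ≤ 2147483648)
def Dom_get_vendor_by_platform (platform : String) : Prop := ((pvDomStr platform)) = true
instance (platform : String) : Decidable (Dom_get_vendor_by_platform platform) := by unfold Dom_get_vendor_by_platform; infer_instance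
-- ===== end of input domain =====

-- B replaces A's per-call scan over VENDOR_MAP's lists with a precomputed inverted
-- dict (platform -> vendor) and a single lookup (objective: idiomatic).

-- ===== PORT A =====
def pyVENDOR_MAP : List (String × List String) :=
  [("cisco", ["cisco_ios", "cisco_iosxe", "cisco_xe", "cisco_iosxr", "cisco_xr",
              "cisco_nxos", "cisco_asa"]),
   ("arista", ["arista_eos"]),
   ("juniper", ["juniper", "juniper_junos"]),
   ("huawei", ["huawei", "huawei_vrp"]),
   ("eltex", ["eltex", "eltex_mes"]),
   ("mikrotik", ["mikrotik_routeros"]),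
   ("fortinet", ["fortinet"]),
   ("paloalto", ["paloalto_panos"]),
   ("qtech", ["qtech", "qtech_qsw"])]

-- the 'for vendor, platforms in VENDOR_MAP.items(): if platform_lower in platforms: return vendor' loop
def vendorLoop (pl : String) : List (String × List String) → Option String
  | [] => none
  | (vendor, platforms) :: rest =>
      if platforms.contains pl then some vendor else vendorLoop pl rest

def get_vendor_by_platform (platform : String) : String :=
  if platform = "" then "unknown"
  else
    let platform_lower := PySem.Str.lower platform
    match vendorLoop platform_lower pyVENDOR_MAP with
    | some vendor => vendor
    -- platform.split("_")[0]: the separator "_" is nonempty so split? is some, and the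
    -- split result is never empty, so [0] is its head
    | none => ((PySem.Str.split? platform "_").getD []).headD ""

-- ===== PORT B =====
-- {plat: vendor for vendor, plats in VENDOR_MAP.items() for plat in plats}
def REVERSE_VENDOR : PySem.Dict String String :=
  PySem.Dict.ofList (pyVENDOR_MAP.flatMap fun vp => vp.2.map fun plat => (plat, vp.1))

def get_vendor_by_platform_alt (platform : String) : String :=
  if platform = "" then "unknown"
  else
    match REVERSE_VENDOR.get? (PySem.Str.lower platform) with
    | some vendor => vendor
    | none => ((PySem.Str.split? platform "_").getD []).headD ""

-- ===== PRECONDITION & SPEC =====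
def Spec_get_vendor_by_platform (platform : String) (out : String) : Prop := out = get_vendor_by_platform_alt platform
instance (platform : String) (out : String) : Decidable (Spec_get_vendor_by_platform platform out) := by unfold Spec_get_vendor_by_platform; infer_instance

-- ===== CLAIM (what is proved, stated in full; the proofs are below) =====
def Claim_equal_get_vendor_by_platform : Prop := ∀ (platform : String), Dom_get_vendor_by_platform platform → Spec_get_vendor_by_platform platform (get_vendor_by_platform platform)

-- ===== LEMMAS AND PROOFS =====

-- looking up in a block of pairs (p, v) for p ∈ plats is the membership test of A's loop body
theorem get?_mk_block (v pl : String) (plats : List String) (L : List (String × String)) :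
    (PySem.Dict.mk (plats.map (fun p => (p, v)) ++ L)).get? pl =
      if plats.contains pl then some v else (PySem.Dict.mk L).get? pl := by
  induction plats with
  | nil => simp
  | cons p ps ih =>
      by_cases h : pl = p
      · subst h
        simp [PySem.Dict.get?_mk_cons]
      · have hb : (p == pl) = false := beq_false_of_ne (Ne.symm h)
        simp [PySem.Dict.get?_mk_cons, hb, ih, h]

-- lookup in the flattened association list = A's first-match loop over the vendor map
theorem get?_flat (pl : String) (m : List (String × List String)) :
    (PySem.Dict.mk (m.flatMap fun vp => vp.2.map fun plat => (plat, vp.1))).get? pl =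
      vendorLoop pl m := by
  induction m with
  | nil => simp [vendorLoop, PySem.Dict.get?]
  | cons vp rest ih =>
      simp only [List.flatMap_cons, vendorLoop, get?_mk_block, ih]

theorem reverse_vendor_mk :
    REVERSE_VENDOR =
      PySem.Dict.mk (pyVENDOR_MAP.flatMap fun vp => vp.2.map fun plat => (plat, vp.1)) := by
  decide

-- ===== VERDICT (by name: the statement is the Claim_ definition above) =====
theorem get_vendor_by_platform_spec : Claim_equal_get_vendor_by_platform := by
  intro platform _
  unfold Spec_get_vendor_by_platform get_vendor_by_platform get_vendor_by_platform_alt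
  by_cases h : platform = ""
  · simp [h]
  · simp only [h, if_false, reverse_vendor_mk, get?_flat]
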